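-- pv_equiv track=rewrite | github.com/timoteimolcut/advent_of_code | 2015/11/main.py | increment_word_list
-- ===== SOURCE A (Python) =====
-- def increment_word_list(list):
--     transport = 0
--     if list[-1] == 25:
--         transport = 1
--     list[-1] = (list[-1] + 1) % 26
--     for i in range(len(list)-2, -1, -1):
--         list[i] = (list[i] + transport) % 26
--         if transport == 1 and list[i] == 0:
--             transport = 1
--         else:
--             transport = 0
--     return list
-- ===== SOURCE B (Python) =====
-- def increment_word_list(list):
--     # canonicalize every entry to a base-26 digit, then increment with carry
--     list[:] = [x % 26 for x in list]
--     j = len(list) - 1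
--     while j >= 0 and list[j] == 25:
--         j -= 1
--     if j < 0:
--         list[:] = [0] * len(list)
--     else:
--         list[j] += 1
--         list[j + 1:] = [0] * (len(list) - 1 - j)
--     return list
-- ===== Notes on version B (the rewrite author's own statement) =====
-- stated objective: alternative
-- what changed: Replaces A's right-to-left per-digit carry loop with a canonicalize-mod-26 pass followed by a pivot search (rightmost non-25 digit), one increment and a zero fill; Pre_ excludes only the empty list, on which A raises IndexError reading its last element.
-- intended difference: On lists of length >= 2 whose last entry is congruent to 25 mod 26 but not literally 25, A zeroes the last digit without carrying into the next one (its carry test is a literal equality test with 25 on the raw last entry although it reduces every digit mod 26), while B canonicalizes and propagates the carry, which is the intended base-26 increment. — e.g. on increment_word_list([0, 51]): A returns [0, 0], B returns [1, 0]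
import Mathlib
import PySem

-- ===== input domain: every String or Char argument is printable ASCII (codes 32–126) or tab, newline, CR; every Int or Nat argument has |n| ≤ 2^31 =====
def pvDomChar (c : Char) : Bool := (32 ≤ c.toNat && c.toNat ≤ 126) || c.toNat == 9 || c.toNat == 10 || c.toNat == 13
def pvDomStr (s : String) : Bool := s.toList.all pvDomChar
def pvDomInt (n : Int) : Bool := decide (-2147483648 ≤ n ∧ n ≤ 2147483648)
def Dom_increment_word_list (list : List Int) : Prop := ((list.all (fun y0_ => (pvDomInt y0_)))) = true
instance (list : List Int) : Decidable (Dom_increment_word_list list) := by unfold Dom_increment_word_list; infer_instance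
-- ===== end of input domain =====

-- B canonicalizes every entry mod 26 and then does a pivot increment instead of
-- A's per-digit carry loop (objective: alternative); on lists whose last entry is
-- ≡ 25 (mod 26) but not literally 25, A drops the carry and B propagates it (D_).
-- Both Pythons mutate the argument list in place and return it.


-- ===== PORT A =====
-- the body of A's for-loop, as a fold step over (list, transport)
def pvStepA (st : List Int × Int) (i : Int) : List Int × Int :=
  let v := PySem.Int.mod (PySem.List.pyGetD st.1 i 0 + st.2) 26
  (PySem.List.pySetD st.1 i v, if st.2 = 1 ∧ v = 0 then 1 else 0)

def increment_word_list (list : List Int) : List Int :=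
  -- the last-element access raises IndexError on the empty list; excluded by Pre_ (default 0 is never used there)
  let last := PySem.List.pyGetD list (-1) 0
  let transport : Int := if last = 25 then 1 else 0
  let l0 := PySem.List.pySetD list (-1) (PySem.Int.mod (last + 1) 26)
  ((PySem.List.pyRange ((list.length : Int) - 2) (-1) (-1)).foldl pvStepA (l0, transport)).1

-- ===== PORT B =====
-- B's while-loop: j runs n-1, n-2, … while list[j] == 25; encoded as recursion on k = j+1
def pvPivotB (l : List Int) : Nat → Option Nat
  | 0 => none
  | k + 1 => if l.getD k 0 = 25 then pvPivotB l k else some k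

def increment_word_list_alt (list : List Int) : List Int :=
  let c := list.map (fun x => PySem.Int.mod x 26)   -- list[:] = [x % 26 for x in list]
  match pvPivotB c c.length with
  | none => List.replicate c.length 0               -- list[:] = [0] * len(list)
  | some j =>                                       -- list[j] += 1; list[j+1:] = [0] * (n-1-j)
      c.take j ++ [c.getD j 0 + 1] ++ List.replicate (c.length - 1 - j) 0

-- ===== PRECONDITION & SPEC =====
-- Pre_ excludes only the empty list, on which A raises IndexError reading its last element.
def Pre_increment_word_list (list : List Int) : Prop := list ≠ []
instance (list : List Int) : Decidable (Pre_increment_word_list list) := by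
  unfold Pre_increment_word_list; infer_instance

def pvWitness_increment_word_list : List Int := [3, 25, 25]

-- On lists of length ≥ 2 whose last entry is ≡ 25 (mod 26) but not literally 25, A zeroes the
-- last digit without carrying (its carry test is a literal equality test with 25 on the raw last entry although it reduces
-- every digit mod 26); B canonicalizes and propagates the carry, the intended base-26 increment.
def D_increment_word_list (list : List Int) : Prop :=
  2 ≤ list.length ∧ PySem.Int.mod (list.getD (list.length - 1) 0) 26 = 25 ∧
    list.getD (list.length - 1) 0 ≠ 25
instance (list : List Int) : Decidable (D_increment_word_list list) := by
  unfold D_increment_word_list; infer_instance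

def Spec_increment_word_list (list : List Int) (out : List Int) : Prop :=
  ¬ D_increment_word_list list → out = increment_word_list_alt list
instance (list : List Int) (out : List Int) : Decidable (Spec_increment_word_list list out) := by
  unfold Spec_increment_word_list; infer_instance

def pvDiffWitness_increment_word_list : List Int := [0, 51]
def pvDiffWitnessOut_increment_word_list : (List Int) × (List Int) := ([0, 0], [1, 0])

-- ===== CLAIM (what is proved, stated in full; the proofs are below) =====
def Claim_unchanged_increment_word_list : Prop := ∀ (list : List Int), Dom_increment_word_list list → Pre_increment_word_list list → Spec_increment_word_list list (increment_word_list list)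
def Claim_changed_increment_word_list : Prop := Dom_increment_word_list (pvDiffWitness_increment_word_list) ∧ Pre_increment_word_list (pvDiffWitness_increment_word_list) ∧ D_increment_word_list (pvDiffWitness_increment_word_list) ∧ increment_word_list (pvDiffWitness_increment_word_list) = pvDiffWitnessOut_increment_word_list.1 ∧ increment_word_list_alt (pvDiffWitness_increment_word_list) = pvDiffWitnessOut_increment_word_list.2 ∧ pvDiffWitnessOut_increment_word_list.1 ≠ pvDiffWitnessOut_increment_word_list.2
def Claim_exact_increment_word_list : Prop := ∀ (list : List Int), Dom_increment_word_list list → Pre_increment_word_list list → D_increment_word_list list → increment_word_list list ≠ increment_word_list_alt list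

-- ===== LEMMAS AND PROOFS =====

-- base-26 increment with carry on a reversed canonical digit list (least-significant first)
def pvInc26 : List Int → List Int
  | [] => []
  | y :: ys => if y = 25 then 0 :: pvInc26 ys else (y + 1) :: ys

-- A's carry pass on a reversed list with incoming transport t
def pvCapp : List Int → Int → List Int
  | [], _ => []
  | x :: xs, t =>
      let v := PySem.Int.mod (x + t) 26
      v :: pvCapp xs (if t = 1 ∧ v = 0 then 1 else 0)

theorem pv_take_set (l : List Int) (n : Nat) (v : Int) :
    (l.set n v).take n = l.take n := by
  rw [List.take_set]
  exact List.set_eq_of_length_le (by simp)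

theorem pv_drop_set (l : List Int) (n : Nat) (v : Int) (h : n < l.length) :
    (l.set n v).drop n = v :: l.drop (n + 1) := by
  rw [List.set_eq_take_cons_drop v h, List.drop_append]
  simp [Nat.le_of_lt h]

theorem pvFoldA_eq (n : Nat) (l : List Int) (t : Int) (hn : n ≤ l.length) :
    ((PySem.List.pyRange ((n : Int) - 1) (-1) (-1)).foldl pvStepA (l, t)).1 =
      (pvCapp ((l.take n).reverse) t).reverse ++ l.drop n := by
  induction n generalizing l t with
  | zero =>
    rw [show ((0 : Nat) : Int) - 1 = -1 by norm_num,
        PySem.List.pyRange_neg_one_eq_nil (le_refl _)]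
    simp [pvCapp]
  | succ n ih =>
    have hn' : n < l.length := hn
    have harg : (((n + 1 : Nat) : Nat) : Int) - 1 = (n : Int) := by push_cast; ring
    rw [harg, PySem.List.pyRange_neg_one_cons (by omega), List.foldl_cons]
    have hstep : pvStepA (l, t) (n : Int) =
        (l.set n (PySem.Int.mod (l[n] + t) 26),
         if t = 1 ∧ PySem.Int.mod (l[n] + t) 26 = 0 then 1 else 0) := by
      unfold pvStepA
      simp only [PySem.List.pyGetD_natCast, PySem.List.pySetD_natCast,
        List.getD_eq_getElem l 0 hn']
    rw [hstep, ih _ _ (by simp [Nat.le_of_lt hn'])]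
    rw [pv_take_set, pv_drop_set l n _ hn', List.take_succ_eq_append_getElem hn',
        show (List.take n l ++ [l[n]]).reverse = l[n] :: (List.take n l).reverse by simp]
    simp only [pvCapp, List.reverse_cons, List.append_assoc, List.cons_append,
      List.nil_append]

theorem pvCapp_zero (m : List Int) :
    pvCapp m 0 = m.map (fun x => PySem.Int.mod x 26) := by
  induction m with
  | nil => rfl
  | cons x xs ih =>
    simp only [pvCapp, add_zero, List.map_cons]
    rw [if_neg (by norm_num), ih]

theorem pvCapp_one (m : List Int) :
    pvCapp m 1 = pvInc26 (m.map (fun x => PySem.Int.mod x 26)) := by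
  induction m with
  | nil => rfl
  | cons x xs ih =>
    have h26 := PySem.Int.mod_eq_emod_of_pos (a := x) (show (0:Int) < 26 by norm_num)
    have h26' := PySem.Int.mod_eq_emod_of_pos (a := x + 1) (show (0:Int) < 26 by norm_num)
    have hrange : 0 ≤ x % 26 ∧ x % 26 < 26 :=
      ⟨Int.emod_nonneg x (by norm_num), Int.emod_lt_of_pos x (by norm_num)⟩
    by_cases hx : PySem.Int.mod x 26 = 25
    · have hv : PySem.Int.mod (x + 1) 26 = 0 := by rw [h26']; rw [h26] at hx; omega
      simp only [pvCapp, pvInc26, List.map_cons, hv, if_pos hx, and_self, if_true]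
      rw [ih]
    · have hv : PySem.Int.mod (x + 1) 26 = PySem.Int.mod x 26 + 1 := by
        rw [h26']; rw [h26] at hx ⊢; omega
      have hv0 : ¬ (PySem.Int.mod x 26 + 1 = 0) := by rw [h26]; omega
      simp only [pvCapp, pvInc26, List.map_cons, hv, if_neg hx]
      rw [if_neg (fun h => hv0 h.2), pvCapp_zero]

theorem pvPivotB_lt (l : List Int) (k : Nat) (j : Nat) (h : pvPivotB l k = some j) : j < k := by
  induction k with
  | zero => simp [pvPivotB] at h
  | succ k ih =>
    rw [pvPivotB] at h
    split at h
    · exact Nat.lt_succ_of_lt (ih h)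
    · cases h; omega

theorem pvPivotB_eq (l : List Int) (k : Nat) (hk : k ≤ l.length) :
    (match pvPivotB l k with
     | none => List.replicate k (0 : Int)
     | some j => l.take j ++ [l.getD j 0 + 1] ++ List.replicate (k - 1 - j) 0) =
      (pvInc26 ((l.take k).reverse)).reverse := by
  induction k with
  | zero => simp [pvPivotB, pvInc26]
  | succ k ih =>
    have hk' : k < l.length := hk
    rw [List.take_succ_eq_append_getElem hk',
        show (List.take k l ++ [l[k]]).reverse = l[k] :: (List.take k l).reverse by simp,
        pvPivotB]
    have hget : l.getD k 0 = l[k] := List.getD_eq_getElem l 0 hk'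
    by_cases hx : l.getD k 0 = 25
    · rw [if_pos hx]
      rw [pvInc26, if_pos (by rw [← hget]; exact hx), List.reverse_cons,
          ← ih (Nat.le_of_lt hk')]
      cases hp : pvPivotB l k with
      | none => simp [List.replicate_succ']
      | some j =>
        have hj := pvPivotB_lt l k j hp
        dsimp only
        rw [show k + 1 - 1 - j = (k - 1 - j) + 1 by omega, List.replicate_succ']
        simp [List.append_assoc]
    · rw [if_neg hx]
      dsimp only
      rw [pvInc26, if_neg (by rw [← hget]; exact hx), List.reverse_cons, hget]
      simp

-- B's pivot-and-fill on a canonical digit list whose last digit is 25, assembled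
theorem pvB_carry (d : List Int) :
    (match pvPivotB (d ++ [(25 : Int)]) ((d ++ [(25 : Int)]).length) with
     | none => List.replicate ((d ++ [(25 : Int)]).length) (0 : Int)
     | some j =>
         (d ++ [(25 : Int)]).take j ++ [(d ++ [(25 : Int)]).getD j 0 + 1]
           ++ List.replicate ((d ++ [(25 : Int)]).length - 1 - j) 0) =
      (pvInc26 d.reverse).reverse ++ [0] := by
  simp only [List.length_append, List.length_cons, List.length_nil]
  rw [pvPivotB]
  have hget : (d ++ [(25 : Int)]).getD d.length 0 = 25 := by
    rw [List.getD_eq_getElem _ 0 (by simp)]; simp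
  rw [if_pos hget]
  have hlem := pvPivotB_eq (d ++ [(25 : Int)]) d.length (by simp)
  rw [List.take_left] at hlem
  cases hp : pvPivotB (d ++ [(25 : Int)]) d.length with
  | none =>
    rw [hp] at hlem
    dsimp only at hlem ⊢
    rw [← hlem]
    simp [List.replicate_succ']
  | some j =>
    have hj := pvPivotB_lt _ _ _ hp
    rw [hp] at hlem
    dsimp only at hlem ⊢
    rw [List.take_append_of_le_length (Nat.le_of_lt hj),
        show d.length + 0 + 1 - 1 - j = (d.length - 1 - j) + 1 by omega,
        List.replicate_succ']
    rw [List.take_append_of_le_length (Nat.le_of_lt hj)] at hlem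
    rw [← hlem]
    simp [List.append_assoc]

-- B's pivot-and-fill when the last canonical digit absorbs the increment
theorem pvB_nocarry (d : List Int) (y : Int) (hy : y ≠ 25) :
    (match pvPivotB (d ++ [y]) ((d ++ [y]).length) with
     | none => List.replicate ((d ++ [y]).length) (0 : Int)
     | some j =>
         (d ++ [y]).take j ++ [(d ++ [y]).getD j 0 + 1]
           ++ List.replicate ((d ++ [y]).length - 1 - j) 0) =
      d ++ [y + 1] := by
  simp only [List.length_append, List.length_cons, List.length_nil]
  rw [pvPivotB]
  have hget : (d ++ [y]).getD d.length 0 = y := by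
    rw [List.getD_eq_getElem _ 0 (by simp)]; simp
  rw [hget, if_neg hy]
  dsimp only
  rw [List.take_left, hget]
  simp

theorem pvInc26_ne (d : List Int) (hd : d ≠ []) : pvInc26 d ≠ d := by
  cases d with
  | nil => exact absurd rfl hd
  | cons y ys =>
    rw [pvInc26]
    by_cases hy : y = 25
    · rw [if_pos hy]
      intro h
      rw [hy] at h
      exact absurd (List.head_eq_of_cons_eq h) (by norm_num)
    · rw [if_neg hy]
      intro h
      have := List.head_eq_of_cons_eq h
      omega

-- A's result on m ++ [x], in closed form
theorem pvA_closed (m : List Int) (x : Int) :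
    increment_word_list (m ++ [x]) =
      (pvCapp m.reverse (if x = 25 then 1 else 0)).reverse ++ [PySem.Int.mod (x + 1) 26] := by
  unfold increment_word_list
  rw [PySem.List.pyGetD_neg_one_append_singleton]
  dsimp only
  have hset : PySem.List.pySetD (m ++ [x]) (-1) (PySem.Int.mod (x + 1) 26)
      = m ++ [PySem.Int.mod (x + 1) 26] := by
    simp [PySem.List.pySetD, PySem.List.pySet?, PySem.List.pyIdx?]
  have hlen : (((m ++ [x]).length : Int)) - 2 = ((m.length : Nat) : Int) - 1 := by
    simp; omega
  rw [hset, hlen, pvFoldA_eq m.length (m ++ [PySem.Int.mod (x + 1) 26]) _ (by simp)]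
  rw [List.take_left, List.drop_left]

-- the last element of m ++ [x], as D_ reads it
theorem pv_getD_last (m : List Int) (x : Int) :
    (m ++ [x]).getD ((m ++ [x]).length - 1) 0 = x := by
  have h1 : (m ++ [x]).length - 1 = m.length := by simp
  rw [h1, List.getD_eq_getElem _ 0 (by simp)]
  simp

theorem increment_word_list_spec : Claim_unchanged_increment_word_list := by
  intro l _ hne hnd
  rcases List.eq_nil_or_concat l with h | ⟨m, x, rfl⟩
  · exact absurd h hne
  simp only [List.concat_eq_append] at hnd ⊢
  unfold increment_word_list_alt
  rw [pvA_closed]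
  have hmap : (m ++ [x]).map (fun x => PySem.Int.mod x 26)
      = m.map (fun x => PySem.Int.mod x 26) ++ [PySem.Int.mod x 26] := by simp
  have h26 := PySem.Int.mod_eq_emod_of_pos (a := x) (show (0:Int) < 26 by norm_num)
  have h26' := PySem.Int.mod_eq_emod_of_pos (a := x + 1) (show (0:Int) < 26 by norm_num)
  by_cases hx : PySem.Int.mod x 26 = 25
  · -- the last digit is ≡ 25 (mod 26); outside D_ this forces x = 25 or m = []
    have hv : PySem.Int.mod (x + 1) 26 = 0 := by rw [h26']; rw [h26] at hx; omega
    by_cases hx25 : x = 25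
    · rw [if_pos hx25, hv, pvCapp_one]
      simp only [hmap, hx]
      rw [pvB_carry (m.map (fun x => PySem.Int.mod x 26))]
      rw [List.map_reverse]
    · -- outside D_ this forces m = []
      have hm : m = [] := by
        by_contra hm
        refine hnd ⟨?_, ?_, ?_⟩
        · have : 0 < m.length := List.length_pos_of_ne_nil hm
          simp only [List.length_append, List.length_cons, List.length_nil]
          omega
        · rw [pv_getD_last]; exact hx
        · rw [pv_getD_last]; exact hx25
      subst hm
      rw [if_neg hx25, hv]
      simp only [List.nil_append, List.map_cons, List.map_nil, List.length_cons,
        List.length_nil]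
      have hp1 : pvPivotB [PySem.Int.mod x 26] 1
          = if PySem.Int.mod x 26 = 25 then none else some 0 := rfl
      rw [hp1, if_pos hx]
      simp [pvCapp]
  · -- no carry out of the last digit
    have hx25 : x ≠ 25 := fun h => hx (by rw [h]; decide)
    have hv : PySem.Int.mod (x + 1) 26 = PySem.Int.mod x 26 + 1 := by
      rw [h26']; rw [h26] at hx ⊢
      have := Int.emod_nonneg x (show (26:Int) ≠ 0 by norm_num)
      have := Int.emod_lt_of_pos x (show (0:Int) < 26 by norm_num)
      omega
    rw [if_neg hx25, pvCapp_zero, hv]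
    simp only [hmap]
    rw [pvB_nocarry (m.map (fun x => PySem.Int.mod x 26)) (PySem.Int.mod x 26) hx]
    rw [List.map_reverse, List.reverse_reverse]

theorem increment_word_list_changed : Claim_changed_increment_word_list := by
  unfold Claim_changed_increment_word_list; decide

theorem increment_word_list_tight : Claim_exact_increment_word_list := by
  intro l _ hne hd
  rcases List.eq_nil_or_concat l with h | ⟨m, x, rfl⟩
  · exact absurd h hne
  simp only [List.concat_eq_append] at hd ⊢
  obtain ⟨hlen2, hx, hx25⟩ := hd
  rw [pv_getD_last] at hx hx25
  have hm : m ≠ [] := by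
    intro h; subst h; simp at hlen2
  have hv : PySem.Int.mod (x + 1) 26 = 0 := by
    rw [PySem.Int.mod_eq_emod_of_pos (a := x + 1) (by norm_num)]
    rw [PySem.Int.mod_eq_emod_of_pos (a := x) (by norm_num)] at hx
    omega
  unfold increment_word_list_alt
  rw [pvA_closed, if_neg hx25, pvCapp_zero, hv]
  have hmap : (m ++ [x]).map (fun x => PySem.Int.mod x 26)
      = m.map (fun x => PySem.Int.mod x 26) ++ [PySem.Int.mod x 26] := by simp
  simp only [hmap, hx]
  rw [pvB_carry (m.map (fun x => PySem.Int.mod x 26)), List.map_reverse]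
  intro hcontra
  have h2 := List.append_cancel_right hcontra
  rw [← List.reverse_inj] at h2
  exact pvInc26_ne ((m.map (fun x => PySem.Int.mod x 26)).reverse)
    (by simpa using hm) (by simpa using h2.symm)
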